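-- pv_equiv track=rewrite | github.com/volha-barysiuk/dqe_homework | news_feed/utils/parsers.py | parse_post_list
-- ===== SOURCE A (Python) =====
-- def parse_post_list(raw_post_list):
--     post_list = []
--     first_lines = []
--     end_lines = []
--     post_type = ''
--     for line in raw_post_list:
--         if line.title() in ('News:\n', 'Private Ad:\n', 'Rumor:\n'):
--             if first_lines or end_lines:
--                 post_list.append([post_type, ''.join(first_lines).rstrip(), ''.join(end_lines).rstrip()])
--                 first_lines = []
--                 end_lines = []
--             post_type = line[:-2]
--         elif line.strip():
--             first_lines.extend(end_lines)
--             end_lines = [line]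
--         else:
--             end_lines.append(line)
--     return post_list
-- ===== SOURCE B (Python) =====
-- HEADERS = ('News:\n', 'Private Ad:\n', 'Rumor:\n')
--
--
-- def _last_nonblank(lines):
--     """Index of the last line with non-whitespace content, or None."""
--     idx = None
--     for j, ln in enumerate(lines):
--         if ln.strip():
--             idx = j
--     return idx
--
--
-- def parse_post_list(raw_post_list):
--     # Pass 1: group the lines under the header that precedes them.
--     # A leading pseudo-group with post_type '' collects lines before any header;
--     # the group after the last header is intentionally unfinished and dropped.
--     groups = []
--     post_type, cur = '', []
--     for line in raw_post_list:
--         if line.title() in HEADERS: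
--             groups.append((post_type, cur))
--             post_type, cur = line[:-2], []
--         else:
--             cur.append(line)
--     # Pass 2: render every completed, non-empty group.
--     post_list = []
--     for post_type, lines in groups:
--         if lines:
--             i = _last_nonblank(lines)
--             first = lines[:i] if i is not None else []
--             end = lines[i:] if i is not None else lines
--             post_list.append([post_type, ''.join(first).rstrip(), ''.join(end).rstrip()])
--     return post_list
-- ===== Notes on version B (the rewrite author's own statement) =====
-- stated objective: simpler
-- what changed: A's single pass that interleaves emitting records with incrementally maintaining the first-lines/last-line split is replaced by two separate passes: first group the lines under their preceding header, then render each completed non-empty group by locating its last non-blank line.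
import Mathlib
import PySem

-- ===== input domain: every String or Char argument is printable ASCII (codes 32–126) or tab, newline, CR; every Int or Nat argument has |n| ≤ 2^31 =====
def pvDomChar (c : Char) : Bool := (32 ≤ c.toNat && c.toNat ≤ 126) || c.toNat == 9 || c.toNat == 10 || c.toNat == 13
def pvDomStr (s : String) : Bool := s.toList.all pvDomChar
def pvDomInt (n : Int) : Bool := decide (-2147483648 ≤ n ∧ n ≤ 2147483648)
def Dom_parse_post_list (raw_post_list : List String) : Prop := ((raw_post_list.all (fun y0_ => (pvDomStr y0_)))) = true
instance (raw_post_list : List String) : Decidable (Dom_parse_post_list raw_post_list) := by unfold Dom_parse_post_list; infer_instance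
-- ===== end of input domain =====

-- B replaces A's single-pass loop (which maintains the first/last-line split incrementally)
-- by two passes: group the lines under their preceding header, then render each completed
-- non-empty group; objective: simpler decomposition, same cost.

-- hand port of Python's str.title() (no PySem primitive): each letter is uppercased when the
-- previous character is not a letter, lowercased otherwise; exact on the ASCII domain.
def pvTitleGo : Bool → List Char → List Char
  | _, [] => []
  | prev, c :: rest =>
    (if PySem.Chars.isalpha c then
       (if prev then PySem.Chars.lowerChar c else PySem.Chars.upperChar c)
     else c) :: pvTitleGo (PySem.Chars.isalpha c) rest

def pvTitle (s : String) : String := String.ofList (pvTitleGo false s.toList)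

-- "line.title() in ('News:\n', 'Private Ad:\n', 'Rumor:\n')" (same expression in both Pythons)
def pvIsHeader (line : String) : Bool :=
  (["News:\n", "Private Ad:\n", "Rumor:\n"] : List String).contains (pvTitle line)

-- ===== PORT A =====
def pvAStep (st : List (List String) × List String × List String × String) (line : String) :
    List (List String) × List String × List String × String :=
  let (post_list, first_lines, end_lines, post_type) := st
  if pvIsHeader line then
    let (post_list', first_lines', end_lines') :=
      if first_lines ≠ [] ∨ end_lines ≠ [] then
        (post_list ++ [[post_type, PySem.Str.rstrip (PySem.Str.join "" first_lines),
                        PySem.Str.rstrip (PySem.Str.join "" end_lines)]],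
         ([] : List String), ([] : List String))
      else (post_list, first_lines, end_lines)
    (post_list', first_lines', end_lines', PySem.Str.slice line none (some (-2)))
  else if PySem.Str.strip line ≠ "" then
    (post_list, first_lines ++ end_lines, [line], post_type)
  else
    (post_list, first_lines, end_lines ++ [line], post_type)

def parse_post_list (raw_post_list : List String) : List (List String) :=
  (raw_post_list.foldl pvAStep ([], [], [], "")).1

-- ===== PORT B =====
-- pass 1: grouping fold (groups, post_type, cur)
def pvBGroupStep (st : List (String × List String) × String × List String) (line : String) :
    List (String × List String) × String × List String :=
  let (groups, post_type, cur) := st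
  if pvIsHeader line then
    (groups ++ [(post_type, cur)], PySem.Str.slice line none (some (-2)), ([] : List String))
  else
    (groups, post_type, cur ++ [line])

-- _last_nonblank: index of the last line with non-whitespace content, or none
def pvLastNB : List String → Nat → Option Nat → Option Nat
  | [], _, idx => idx
  | ln :: rest, j, idx => pvLastNB rest (j + 1) (if PySem.Str.strip ln ≠ "" then some j else idx)

def pvRenderGroup (g : String × List String) : List String :=
  match pvLastNB g.2 0 none with
  | none => [g.1, PySem.Str.rstrip (PySem.Str.join "" ([] : List String)),
             PySem.Str.rstrip (PySem.Str.join "" g.2)]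
  | some i => [g.1,
      PySem.Str.rstrip (PySem.Str.join "" (PySem.List.slice g.2 none (some (i : Int)))),
      PySem.Str.rstrip (PySem.Str.join "" (PySem.List.slice g.2 (some (i : Int)) none))]

-- pass 2: render every non-empty group
def pvRenderStep (acc : List (List String)) (g : String × List String) : List (List String) :=
  if g.2 ≠ [] then acc ++ [pvRenderGroup g] else acc

def parse_post_list_alt (raw_post_list : List String) : List (List String) :=
  ((raw_post_list.foldl pvBGroupStep ([], "", [])).1).foldl pvRenderStep []

-- ===== PRECONDITION & SPEC =====
def Spec_parse_post_list (raw_post_list : List String) (out : List (List String)) : Prop := out = parse_post_list_alt raw_post_list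
instance (raw_post_list : List String) (out : List (List String)) : Decidable (Spec_parse_post_list raw_post_list out) := by unfold Spec_parse_post_list; infer_instance

-- ===== CLAIM (what is proved, stated in full; the proofs are below) =====
def Claim_equal_parse_post_list : Prop := ∀ (raw_post_list : List String), Dom_parse_post_list raw_post_list → Spec_parse_post_list raw_post_list (parse_post_list raw_post_list)

-- ===== LEMMAS AND PROOFS =====

-- all lines whitespace-only
def pvAllBlank (xs : List String) : Prop := ∀ x ∈ xs, PySem.Str.strip x = ""

-- A's loop invariant on (first_lines, end_lines)
def pvInv (first end_ : List String) : Prop :=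
  (first = [] ∧ pvAllBlank end_) ∨
  (∃ h t, end_ = h :: t ∧ PySem.Str.strip h ≠ "" ∧ pvAllBlank t)

lemma pvLastNB_blank (ys : List String) (h : pvAllBlank ys) :
    ∀ j idx, pvLastNB ys j idx = idx := by
  induction ys with
  | nil => intro j idx; rfl
  | cons y ys ih =>
    intro j idx
    have hy : PySem.Str.strip y = "" := h y (by simp)
    simp [pvLastNB, hy]
    exact ih (fun x hx => h x (by simp [hx])) _ _

lemma pvLastNB_append (xs ys : List String) :
    ∀ j idx, pvLastNB (xs ++ ys) j idx = pvLastNB ys (j + xs.length) (pvLastNB xs j idx) := by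
  induction xs with
  | nil => intro j idx; simp [pvLastNB]
  | cons x xs ih =>
    intro j idx
    simp only [List.cons_append, pvLastNB, ih, List.length_cons]
    ring_nf

lemma pvLastNB_nonblank (h : String) (t : List String) (hh : PySem.Str.strip h ≠ "")
    (hb : pvAllBlank t) : ∀ j idx, pvLastNB (h :: t) j idx = some j := by
  intro j idx
  simp only [pvLastNB, hh, if_pos, ne_eq, not_false_iff]
  exact pvLastNB_blank t hb _ _

-- characterisation: render of a group whose lines come from A's state equals A's record
lemma pvRender_of_inv (pt : String) (first end_ : List String) (hinv : pvInv first end_) :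
    pvRenderGroup (pt, first ++ end_) =
      [pt, PySem.Str.rstrip (PySem.Str.join "" first), PySem.Str.rstrip (PySem.Str.join "" end_)] := by
  rcases hinv with ⟨hf, hb⟩ | ⟨h, t, he, hh, hb⟩
  · subst hf
    unfold pvRenderGroup
    rw [show ((pt, ([] : List String) ++ end_) : String × List String).2 = end_ by simp]
    rw [pvLastNB_blank end_ hb 0 none]
  · subst he
    have h1 : pvLastNB (first ++ h :: t) 0 none = some first.length := by
      rw [pvLastNB_append, pvLastNB_nonblank h t hh hb]
      simp
    unfold pvRenderGroup
    simp only [h1]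
    rw [PySem.List.slice_to_natCast, PySem.List.slice_from_natCast]
    rw [List.take_left, List.drop_left]

lemma pvBfold_acc (lines : List String) :
    ∀ gs pt cur, (lines.foldl pvBGroupStep (gs, pt, cur)).1
      = gs ++ (lines.foldl pvBGroupStep ([], pt, cur)).1 := by
  induction lines with
  | nil => intro gs pt cur; simp
  | cons l rest ih =>
    intro gs pt cur
    by_cases h : pvIsHeader l
    · simp only [List.foldl_cons, pvBGroupStep, h, if_pos, List.nil_append]
      rw [ih (gs ++ [(pt, cur)]), ih [(pt, cur)]]
      simp
    · simp only [List.foldl_cons, pvBGroupStep, h, if_neg, Bool.false_eq_true, not_false_iff]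
      exact ih gs pt (cur ++ [l])

lemma pvRender_acc (gs : List (String × List String)) :
    ∀ acc, gs.foldl pvRenderStep acc = acc ++ gs.foldl pvRenderStep [] := by
  induction gs with
  | nil => intro acc; simp
  | cons g gs ih =>
    intro acc
    simp only [List.foldl_cons]
    rw [ih (pvRenderStep acc g), ih (pvRenderStep [] g)]
    simp [pvRenderStep]
    by_cases h : g.2 = [] <;> simp [h]

set_option maxHeartbeats 1000000 in
lemma pvMain (lines : List String) :
    ∀ acc first end_ pt, pvInv first end_ →
      (lines.foldl pvAStep (acc, first, end_, pt)).1
        = acc ++ ((lines.foldl pvBGroupStep ([], pt, first ++ end_)).1).foldl pvRenderStep [] := by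
  induction lines with
  | nil => intro acc first end_ pt _; simp
  | cons l rest ih =>
    intro acc first end_ pt hinv
    have hinv0 : pvInv [] [] := Or.inl ⟨rfl, by intro x hx; cases hx⟩
    by_cases hh : pvIsHeader l
    · by_cases hne : first ≠ [] ∨ end_ ≠ []
      · have hcur : first ++ end_ ≠ [] := by
          rcases hne with hne | hne <;> intro hc <;>
            rcases List.append_eq_nil_iff.mp hc with ⟨h1, h2⟩ <;> tauto
        simp only [List.foldl_cons, pvAStep, pvBGroupStep, hh, if_pos, hne,
          List.nil_append]
        rw [ih _ [] [] _ hinv0]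
        rw [pvBfold_acc rest [(pt, first ++ end_)]]
        rw [List.singleton_append, List.foldl_cons, pvRender_acc]
        simp only [pvRenderStep, ne_eq, hcur, not_false_iff, if_true, List.nil_append]
        rw [pvRender_of_inv pt first end_ hinv,
          pvRender_acc _ [[pt, PySem.Str.rstrip (PySem.Str.join "" first),
            PySem.Str.rstrip (PySem.Str.join "" end_)]]]
        simp
      · simp only [not_or, ne_eq, not_not] at hne
        obtain ⟨hf', he'⟩ := hne
        subst hf'; subst he'
        have hcond : ¬(([] : List String) ≠ [] ∨ ([] : List String) ≠ []) := by simp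
        simp only [List.foldl_cons, pvAStep, pvBGroupStep, hh, if_pos, hcond, if_false,
          List.nil_append, List.append_nil]
        rw [ih _ [] [] _ hinv0]
        rw [pvBfold_acc rest [(pt, ([] : List String))]]
        rw [List.singleton_append, List.foldl_cons, pvRender_acc]
        simp [pvRenderStep]
    · by_cases hs : PySem.Str.strip l ≠ ""
      · simp only [List.foldl_cons, pvAStep, pvBGroupStep, hh, Bool.false_eq_true, if_false,
          ]
        rw [if_pos hs]
        rw [ih _ (first ++ end_) [l] _ (Or.inr ⟨l, [], rfl, hs, by intro x hx; cases hx⟩)]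
      · simp only [ne_eq, not_not] at hs
        have hinv' : pvInv first (end_ ++ [l]) := by
          rcases hinv with ⟨h1, h2⟩ | ⟨h, t, he, hnh, hb⟩
          · refine Or.inl ⟨h1, ?_⟩
            intro x hx
            rcases List.mem_append.mp hx with hx | hx
            · exact h2 x hx
            · rw [List.mem_singleton.mp hx]; exact hs
          · refine Or.inr ⟨h, t ++ [l], by simp [he], hnh, ?_⟩
            intro x hx
            rcases List.mem_append.mp hx with hx | hx
            · exact hb x hx
            · rw [List.mem_singleton.mp hx]; exact hs
        have hs' : ¬ PySem.Str.strip l ≠ "" := by simp [hs]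
        simp only [List.foldl_cons, pvAStep, pvBGroupStep, hh, Bool.false_eq_true, if_false,
          ]
        rw [if_neg hs']
        rw [ih _ first (end_ ++ [l]) _ hinv']
        rw [List.append_assoc]

-- ===== VERDICT (by name: the statement is the Claim_ definition above) =====
theorem parse_post_list_spec : Claim_equal_parse_post_list := by
  intro raw _
  unfold Spec_parse_post_list parse_post_list parse_post_list_alt
  have := pvMain raw [] [] [] "" (Or.inl ⟨rfl, by intro x hx; cases hx⟩)
  simpa using this
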